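-- pv_equiv track=rewrite | github.com/lee-fuhr/total-rekall | src/automation/quality.py | _count_verbs
-- ===== SOURCE A (Python) =====
-- def _count_verbs(text: str) -> int:
--     """Simple verb detection (common action words)."""
--     action_verbs = [
--         "use", "add", "remove", "create", "delete", "update", "fix", "test",
--         "verify", "check", "validate", "ensure", "avoid", "prevent", "enable",
--         "disable", "configure", "install", "run", "execute", "deploy"
--     ]
--
--     words = text.lower().split()
--     return sum(1 for word in words if word in action_verbs)
-- ===== SOURCE B (Python) =====
-- def _count_verbs(text: str) -> int:
--     """Simple verb detection (common action words)."""
--     action_verbs = [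
--         "use", "add", "remove", "create", "delete", "update", "fix", "test",
--         "verify", "check", "validate", "ensure", "avoid", "prevent", "enable",
--         "disable", "configure", "install", "run", "execute", "deploy"
--     ]
--
--     word_counts = {}
--     for w in text.lower().split():
--         word_counts[w] = word_counts.get(w, 0) + 1
--     return sum(word_counts.get(v, 0) for v in action_verbs)
-- ===== Notes on version B (the rewrite author's own statement) =====
-- stated objective: alternative
-- what changed: B builds a word-frequency dictionary in one pass over the text and then sums the table entries of the 21 fixed verbs, instead of scanning every word with a linear membership test against the verb list.
import Mathlib
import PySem

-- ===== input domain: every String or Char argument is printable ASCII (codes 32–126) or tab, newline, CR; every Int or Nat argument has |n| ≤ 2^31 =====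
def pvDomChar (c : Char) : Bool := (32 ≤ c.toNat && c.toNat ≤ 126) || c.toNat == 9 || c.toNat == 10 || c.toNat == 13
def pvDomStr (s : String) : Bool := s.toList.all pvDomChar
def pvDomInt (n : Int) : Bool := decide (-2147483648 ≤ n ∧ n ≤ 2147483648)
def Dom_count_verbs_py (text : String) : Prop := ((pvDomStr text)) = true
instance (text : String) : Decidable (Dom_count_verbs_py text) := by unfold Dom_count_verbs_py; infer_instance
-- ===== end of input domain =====

-- B replaces A's per-word membership scan by a frequency dictionary built once and
-- 21 table lookups (alternative decomposition; same return value).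

def pvActionVerbs : List String :=
  ["use", "add", "remove", "create", "delete", "update", "fix", "test",
   "verify", "check", "validate", "ensure", "avoid", "prevent", "enable",
   "disable", "configure", "install", "run", "execute", "deploy"]

-- ===== PORT A =====
-- words = text.lower().split(); sum(1 for word in words if word in action_verbs)
def count_verbs_py (text : String) : Int :=
  let words := PySem.Str.split₀ (PySem.Str.lower text)
  ((words.filter (fun word => word ∈ pvActionVerbs)).map (fun _ => (1 : Int))).sum

-- ===== PORT B =====
-- word_counts = {}; for w in text.lower().split(): word_counts[w] = word_counts.get(w,0)+1
-- return sum(word_counts.get(v,0) for v in action_verbs)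
def count_verbs_py_alt (text : String) : Int :=
  let word_counts :=
    (PySem.Str.split₀ (PySem.Str.lower text)).foldl
      (fun d w => d.insert w (d.getD w 0 + 1)) PySem.Dict.empty
  pvActionVerbs.foldl (fun acc v => acc + word_counts.getD v 0) 0

-- ===== PRECONDITION & SPEC =====
def Spec_count_verbs_py (text : String) (out : Int) : Prop := out = count_verbs_py_alt text
instance (text : String) (out : Int) : Decidable (Spec_count_verbs_py text out) := by unfold Spec_count_verbs_py; infer_instance

-- ===== CLAIM (what is proved, stated in full; the proofs are below) =====
def Claim_equal_count_verbs_py : Prop := ∀ (text : String), Dom_count_verbs_py text → Spec_count_verbs_py text (count_verbs_py text)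

-- ===== LEMMAS AND PROOFS =====

-- counting the words lying in v :: vs splits off the count of v when v ∉ vs
theorem pv_countP_cons_mem (ws : List String) (v : String) (vs : List String) (hv : v ∉ vs) :
    ws.countP (fun w => decide (w ∈ v :: vs))
      = ws.count v + ws.countP (fun w => decide (w ∈ vs)) := by
  induction ws with
  | nil => simp
  | cons w ws ih =>
    simp only [List.countP_cons, List.count_cons, ih]
    by_cases h1 : w = v
    · subst h1
      simp [hv]; omega
    · by_cases h2 : w ∈ vs <;> simp [h1, h2] <;> omega

-- Σ_{v ∈ vs} ws.count v = ws.countP (· ∈ vs) for a duplicate-free verb list vs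
theorem pv_sum_counts (vs : List String) (hn : vs.Nodup) (ws : List String) :
    (vs.map (fun v => ((ws.count v : Nat) : Int))).sum
      = ((ws.countP (fun w => decide (w ∈ vs)) : Nat) : Int) := by
  induction vs with
  | nil => simp
  | cons v vs ih =>
    have hv : v ∉ vs := (List.nodup_cons.mp hn).1
    rw [List.map_cons, List.sum_cons, ih hn.of_cons, pv_countP_cons_mem ws v vs hv]
    push_cast
    ring

theorem count_verbs_py_eq_alt_aux (ws : List String) :
    ((ws.filter (fun word => word ∈ pvActionVerbs)).map (fun _ => (1 : Int))).sum
      = pvActionVerbs.foldl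
          (fun acc v =>
            acc + (ws.foldl (fun d w => d.insert w (d.getD w 0 + 1)) PySem.Dict.empty).getD v 0) 0 := by
  rw [PySem.List.foldl_congr_mem pvActionVerbs _
        (fun acc v => acc + ((ws.count v : Nat) : Int)) 0
        (by intro acc v _
            rw [PySem.Dict.getD_foldl_insert_add_one]
            simp [PySem.Dict.getD_empty]),
      PySem.List.foldl_add, pv_sum_counts pvActionVerbs (by decide) ws]
  simp [List.countP_eq_length_filter]

-- ===== VERDICT (by name: the statement is the Claim_ definition above) =====
theorem count_verbs_py_spec : Claim_equal_count_verbs_py := by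
  intro text _
  unfold Spec_count_verbs_py count_verbs_py count_verbs_py_alt
  exact count_verbs_py_eq_alt_aux _
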